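-- pv_equiv track=rewrite | github.com/arjunastev7/vienny-bot | src/formulas/manutiras.py | _calc_fmei
-- ===== SOURCE A (Python) =====
-- PYTHAGOREAN: dict[str, int] = {
--     'A': 1, 'B': 2, 'C': 3, 'D': 4, 'E': 5, 'F': 6, 'G': 7, 'H': 8, 'I': 9,
--     'J': 1, 'K': 2, 'L': 3, 'M': 4, 'N': 5, 'O': 6, 'P': 7, 'Q': 8, 'R': 9,
--     'S': 1, 'T': 2, 'U': 3, 'V': 4, 'W': 5, 'X': 6, 'Y': 7, 'Z': 8,
-- }
--
-- def letter_value(ch: str) -> int: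
--     """Konversi satu huruf ke nilai Pythagorean. Return 0 jika bukan huruf."""
--     return PYTHAGOREAN.get(ch.upper(), 0)
--
-- def _calc_fmei(words: list[str]) -> dict[str, int]:
--     """
--     FMEI = jumlah huruf per kategori nilai Pythagorean:
--       F (Finance):    nilai {4, 5}  → huruf D,E,M,N,V,W
--       M (Marriage):   nilai {1, 8}  → huruf A,H,J,Q,S,Z
--       E (Expression): nilai {2,3,6} → huruf B,C,F,K,L,O,T,U,X
--       I (Identity):   nilai {7, 9}  → huruf G,I,P,R,Y
--     Cross-check: F+M+E+I = total huruf dalam nama (tanpa spasi)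
--     """
--     counts = {'F': 0, 'M': 0, 'E': 0, 'I': 0}
--     for word in words:
--         for ch in word.upper():
--             if not ch.isalpha():
--                 continue
--             val = letter_value(ch)
--             if val in {4, 5}:
--                 counts['F'] += 1
--             elif val in {1, 8}:
--                 counts['M'] += 1
--             elif val in {2, 3, 6}:
--                 counts['E'] += 1
--             elif val in {7, 9}:
--                 counts['I'] += 1
--     return counts
-- ===== SOURCE B (Python) =====
-- # B: tally-free two-phase decomposition -- flatten all uppercased characters once,
-- # then compute each category total as a direct membership count over that list.
-- def _calc_fmei(words):
--     chars = [ch for word in words for ch in word.upper()]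
--     return {
--         'F': sum(1 if ch in 'DEMNVW' else 0 for ch in chars),
--         'M': sum(1 if ch in 'AHJQSZ' else 0 for ch in chars),
--         'E': sum(1 if ch in 'BCFKLOTUX' else 0 for ch in chars),
--         'I': sum(1 if ch in 'GIPRY' else 0 for ch in chars),
--     }
-- ===== Notes on version B (the rewrite author's own statement) =====
-- stated objective: simpler
-- what changed: Replaces the single classify-and-increment dict loop (lookup in the Pythagorean table, then a branch chain per character) by a two-phase pass: flatten all uppercased characters once, then obtain each category total as a plain membership count over the precomputed per-category letter strings, with no numeric table and no branching.
import Mathlib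
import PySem

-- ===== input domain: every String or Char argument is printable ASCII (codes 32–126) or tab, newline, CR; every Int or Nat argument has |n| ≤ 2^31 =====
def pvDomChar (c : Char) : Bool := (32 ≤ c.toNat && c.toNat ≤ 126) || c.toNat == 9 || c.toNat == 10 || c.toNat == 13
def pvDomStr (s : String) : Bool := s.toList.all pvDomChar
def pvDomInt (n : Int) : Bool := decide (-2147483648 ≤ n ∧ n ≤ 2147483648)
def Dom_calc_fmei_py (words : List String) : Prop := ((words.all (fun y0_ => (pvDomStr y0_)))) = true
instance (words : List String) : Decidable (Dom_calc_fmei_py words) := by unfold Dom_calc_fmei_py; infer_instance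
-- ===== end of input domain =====

-- B replaces A's classify-and-increment dict loop by a flatten-then-count-per-category pass (simpler decomposition, same cost).

-- ===== PORT A =====
-- PYTHAGOREAN's keys are the single uppercase letters; represented with Char keys
-- since the loop classifies one character at a time.
def PYTHAGOREAN : PySem.Dict Char Int := PySem.Dict.ofList
  [('A', 1), ('B', 2), ('C', 3), ('D', 4), ('E', 5), ('F', 6), ('G', 7), ('H', 8), ('I', 9),
   ('J', 1), ('K', 2), ('L', 3), ('M', 4), ('N', 5), ('O', 6), ('P', 7), ('Q', 8), ('R', 9),
   ('S', 1), ('T', 2), ('U', 3), ('V', 4), ('W', 5), ('X', 6), ('Y', 7), ('Z', 8)]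

def letter_value (ch : Char) : Int := PYTHAGOREAN.getD (PySem.Chars.upperChar ch) 0

-- body of A's inner loop: classify one character and bump the matching counter
def fmeiStep (counts : PySem.Dict String Int) (ch : Char) : PySem.Dict String Int :=
  if ¬ PySem.Chars.isalpha ch then counts
  else
    let val := letter_value ch
    if val = 4 ∨ val = 5 then counts.modify "F" 0 (· + 1)
    else if val = 1 ∨ val = 8 then counts.modify "M" 0 (· + 1)
    else if val = 2 ∨ val = 3 ∨ val = 6 then counts.modify "E" 0 (· + 1)
    else if val = 7 ∨ val = 9 then counts.modify "I" 0 (· + 1)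
    else counts

def calc_fmei_py (words : List String) : List (String × Int) :=
  (words.foldl
    (fun counts word => (PySem.Chars.upper word.toList).foldl fmeiStep counts)
    (PySem.Dict.ofList [("F", 0), ("M", 0), ("E", 0), ("I", 0)])).items

-- ===== PORT B =====
-- sum(1 if ch in cat else 0 for ch in chars)
def catCount (chars : List Char) (cat : List Char) : Int :=
  (chars.map (fun ch => if ch ∈ cat then (1 : Int) else 0)).sum

def calc_fmei_py_alt (words : List String) : List (String × Int) :=
  let chars := words.flatMap (fun word => PySem.Chars.upper word.toList)
  [("F", catCount chars "DEMNVW".toList),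
   ("M", catCount chars "AHJQSZ".toList),
   ("E", catCount chars "BCFKLOTUX".toList),
   ("I", catCount chars "GIPRY".toList)]

-- ===== PRECONDITION & SPEC =====
def Spec_calc_fmei_py (words : List String) (out : List (String × Int)) : Prop := out = calc_fmei_py_alt words
instance (words : List String) (out : List (String × Int)) : Decidable (Spec_calc_fmei_py words out) := by unfold Spec_calc_fmei_py; infer_instance

-- ===== CLAIM (what is proved, stated in full; the proofs are below) =====
def Claim_equal_calc_fmei_py : Prop := ∀ (words : List String), Dom_calc_fmei_py words → Spec_calc_fmei_py words (calc_fmei_py words)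

-- ===== LEMMAS AND PROOFS =====

-- the four-counter dict shape A's loop maintains
def mkD (f m e i : Int) : PySem.Dict String Int :=
  PySem.Dict.ofList [("F", f), ("M", m), ("E", e), ("I", i)]

lemma islower_bounds (c : Char) (h : PySem.Chars.islower c = true) :
    97 ≤ c.toNat ∧ c.toNat ≤ 122 := by
  simp only [PySem.Chars.islower, Bool.and_eq_true, decide_eq_true_eq] at h
  obtain ⟨h1, h2⟩ := h
  rw [Char.le_def] at h1 h2
  exact ⟨UInt32.le_iff_toNat_le.mp h1, UInt32.le_iff_toNat_le.mp h2⟩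

lemma isupper_bounds (c : Char) (h : PySem.Chars.isupper c = true) :
    65 ≤ c.toNat ∧ c.toNat ≤ 90 := by
  simp only [PySem.Chars.isupper, Bool.and_eq_true, decide_eq_true_eq] at h
  obtain ⟨h1, h2⟩ := h
  rw [Char.le_def] at h1 h2
  exact ⟨UInt32.le_iff_toNat_le.mp h1, UInt32.le_iff_toNat_le.mp h2⟩

lemma upperChar_idem (c : Char) :
    PySem.Chars.upperChar (PySem.Chars.upperChar c) = PySem.Chars.upperChar c := by
  by_cases h : PySem.Chars.islower c = true
  · obtain ⟨h1, h2⟩ := islower_bounds c h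
    have hc := Char.ofNat_toNat c
    set n := c.toNat with hn
    interval_cases n <;> (rw [← hc]; decide)
  · simp [PySem.Chars.upperChar, h]

set_option maxRecDepth 8192 in
lemma fmeiStep_eq (c : Char) (hc : PySem.Chars.upperChar c = c) (f m e i : Int) :
    fmeiStep (mkD f m e i) c =
      mkD (if c ∈ "DEMNVW".toList then f + 1 else f)
          (if c ∈ "AHJQSZ".toList then m + 1 else m)
          (if c ∈ "BCFKLOTUX".toList then e + 1 else e)
          (if c ∈ "GIPRY".toList then i + 1 else i) := by
  rw [show "DEMNVW".toList = ['D', 'E', 'M', 'N', 'V', 'W'] from by decide,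
      show "AHJQSZ".toList = ['A', 'H', 'J', 'Q', 'S', 'Z'] from by decide,
      show "BCFKLOTUX".toList = ['B', 'C', 'F', 'K', 'L', 'O', 'T', 'U', 'X'] from by decide,
      show "GIPRY".toList = ['G', 'I', 'P', 'R', 'Y'] from by decide]
  by_cases hl : PySem.Chars.islower c = true
  · exfalso
    obtain ⟨h1, h2⟩ := islower_bounds c hl
    have hcn := Char.ofNat_toNat c
    rw [← hcn] at hc
    set n := c.toNat with hn
    interval_cases n <;> revert hc <;> decide
  · by_cases hu : PySem.Chars.isupper c = true
    · obtain ⟨h1, h2⟩ := isupper_bounds c hu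
      have hcn := Char.ofNat_toNat c
      rw [← hcn]
      set n := c.toNat with hn
      interval_cases n <;> rfl
    · have halpha : PySem.Chars.isalpha c = false := by
        simp [PySem.Chars.isalpha, hl, hu]
      have hF : c ∉ ['D', 'E', 'M', 'N', 'V', 'W'] := by
        intro hmem; apply hu; fin_cases hmem <;> rfl
      have hM : c ∉ ['A', 'H', 'J', 'Q', 'S', 'Z'] := by
        intro hmem; apply hu; fin_cases hmem <;> rfl
      have hE : c ∉ ['B', 'C', 'F', 'K', 'L', 'O', 'T', 'U', 'X'] := by
        intro hmem; apply hu; fin_cases hmem <;> rfl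
      have hI : c ∉ ['G', 'I', 'P', 'R', 'Y'] := by
        intro hmem; apply hu; fin_cases hmem <;> rfl
      rw [if_neg hF, if_neg hM, if_neg hE, if_neg hI]
      simp [fmeiStep, halpha]

lemma foldl_fmeiStep (cs : List Char) (h : ∀ c ∈ cs, PySem.Chars.upperChar c = c)
    (f m e i : Int) :
    cs.foldl fmeiStep (mkD f m e i) =
      mkD (f + catCount cs "DEMNVW".toList) (m + catCount cs "AHJQSZ".toList)
          (e + catCount cs "BCFKLOTUX".toList) (i + catCount cs "GIPRY".toList) := by
  induction cs generalizing f m e i with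
  | nil => simp [catCount]
  | cons c cs ih =>
    have hc := h c (List.mem_cons_self ..)
    have hrest : ∀ x ∈ cs, PySem.Chars.upperChar x = x := fun x hx => h x (List.mem_cons_of_mem _ hx)
    simp only [List.foldl_cons, fmeiStep_eq c hc, ih hrest, catCount, List.map_cons,
      List.sum_cons]
    congr 1 <;> (try split_ifs) <;> ring

theorem calc_fmei_py_spec : Claim_equal_calc_fmei_py := by
  intro words _
  show calc_fmei_py words = calc_fmei_py_alt words
  have hup : ∀ c ∈ words.flatMap (fun word => PySem.Chars.upper word.toList),
      PySem.Chars.upperChar c = c := by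
    intro c hcmem
    obtain ⟨w, _, hcw⟩ := List.mem_flatMap.mp hcmem
    obtain ⟨a, _, rfl⟩ := List.mem_map.mp (by simpa [PySem.Chars.upper] using hcw)
    exact upperChar_idem a
  have h0 : PySem.Dict.ofList [("F", (0 : Int)), ("M", 0), ("E", 0), ("I", 0)] = mkD 0 0 0 0 := rfl
  unfold calc_fmei_py calc_fmei_py_alt
  rw [← List.foldl_flatMap, h0, foldl_fmeiStep _ hup 0 0 0 0]
  simp only [zero_add]
  rfl
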